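-- pv_equiv track=rewrite | github.com/2025-2-fundamentos/LAB-01-python-basico-Paulipupo | homework/pregunta_03.py | wordcount_reducer
-- ===== SOURCE A (Python) =====
-- def wordcount_reducer(mapped_data):
--     result = []
--     for key, value in mapped_data:
--         if result and result[-1][0] == key:
--             result[-1] = (key, result[-1][1] + value)
--         else:
--             result.append((key, value))
--
--     return result
-- ===== SOURCE B (Python) =====
-- def wordcount_reducer(mapped_data):
--     result = []
--     i, n = 0, len(mapped_data)
--     while i < n:
--         key, total = mapped_data[i]
--         i += 1
--         while i < n and mapped_data[i][0] == key:
--             total += mapped_data[i][1]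
--             i += 1
--         result.append((key, total))
--     return result
-- ===== Notes on version B (the rewrite author's own statement) =====
-- stated objective: alternative
-- what changed: Replaces A's peek-at-last-result accumulator (checking and rewriting result[-1]) with a two-pointer run scan: an inner loop consumes each run of consecutive equal keys into a running total, then appends the finished pair once.
import Mathlib
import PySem

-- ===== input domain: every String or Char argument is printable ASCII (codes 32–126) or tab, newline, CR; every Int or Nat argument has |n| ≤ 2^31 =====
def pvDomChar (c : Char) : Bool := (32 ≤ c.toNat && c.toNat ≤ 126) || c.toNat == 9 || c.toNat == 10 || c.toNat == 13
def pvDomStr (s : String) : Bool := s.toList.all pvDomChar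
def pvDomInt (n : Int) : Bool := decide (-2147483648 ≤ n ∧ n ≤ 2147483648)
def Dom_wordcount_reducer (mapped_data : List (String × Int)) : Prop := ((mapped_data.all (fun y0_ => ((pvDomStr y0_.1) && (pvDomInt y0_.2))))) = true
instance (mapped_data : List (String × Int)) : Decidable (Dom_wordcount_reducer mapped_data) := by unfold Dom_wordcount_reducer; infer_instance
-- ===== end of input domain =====

-- B replaces A's peek-at-last accumulator with a two-pointer run scan (alternative decomposition, same cost).

-- ===== PORT A =====
-- A: fold over the pairs; if the result is nonempty and its last key equals the current key,
-- rewrite the last entry with the summed value, else append the pair.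
def wordcount_reducer (mapped_data : List (String × Int)) : List (String × Int) :=
  mapped_data.foldl (fun result kv =>
    match result.getLast? with
    | some last =>
        if last.1 == kv.1 then result.dropLast ++ [(kv.1, last.2 + kv.2)]
        else result ++ [kv]
    | none => result ++ [kv]) []

-- ===== PORT B =====
-- B: consume one run of consecutive equal keys at a time (inner loop = wrAltRun),
-- emit one (key, total) pair per run (outer loop = wordcount_reducer_alt).
mutual
  def wrAltRun (key : String) (total : Int) : List (String × Int) → List (String × Int)
    | [] => [(key, total)]
    | (k, v) :: rest =>
        if k == key then wrAltRun key (total + v) rest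
        else (key, total) :: wordcount_reducer_alt ((k, v) :: rest)

  def wordcount_reducer_alt : List (String × Int) → List (String × Int)
    | [] => []
    | (k, v) :: rest => wrAltRun k v rest
end

-- ===== PRECONDITION & SPEC =====
def Spec_wordcount_reducer (mapped_data : List (String × Int)) (out : List (String × Int)) : Prop := out = wordcount_reducer_alt mapped_data
instance (mapped_data : List (String × Int)) (out : List (String × Int)) : Decidable (Spec_wordcount_reducer mapped_data out) := by unfold Spec_wordcount_reducer; infer_instance

-- ===== CLAIM (what is proved, stated in full; the proofs are below) =====
def Claim_equal_wordcount_reducer : Prop := ∀ (mapped_data : List (String × Int)), Dom_wordcount_reducer mapped_data → Spec_wordcount_reducer mapped_data (wordcount_reducer mapped_data)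

-- ===== LEMMAS AND PROOFS =====

-- Invariant: running A's fold from a state ending in an open pair (key, total)
-- produces that prefix followed by B's run scan from (key, total).
theorem wr_fold_inv (l : List (String × Int)) :
    ∀ (r : List (String × Int)) (key : String) (total : Int),
    l.foldl (fun result kv =>
      match result.getLast? with
      | some last =>
          if last.1 == kv.1 then result.dropLast ++ [(kv.1, last.2 + kv.2)]
          else result ++ [kv]
      | none => result ++ [kv]) (r ++ [(key, total)])
    = r ++ wrAltRun key total l := by
  induction l with
  | nil => intro r key total; simp [wrAltRun]
  | cons kv rest ih =>
    intro r key total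
    obtain ⟨k, v⟩ := kv
    by_cases h : key = k
    · subst h
      simp only [List.foldl_cons, List.getLast?_concat, List.dropLast_concat, wrAltRun,
        beq_self_eq_true, if_true]
      exact ih r key (total + v)
    · have h1 : (k == key) = false := beq_eq_false_iff_ne.mpr (Ne.symm h)
      have h2 : (key == k) = false := beq_eq_false_iff_ne.mpr h
      simp only [List.foldl_cons, List.getLast?_concat, List.dropLast_concat, wrAltRun, h1, h2,
        Bool.false_eq_true, if_false]
      rw [ih (r ++ [(key, total)]) k v]
      simp [wordcount_reducer_alt]

-- ===== VERDICT (by name: the statement is the Claim_ definition above) =====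
theorem wordcount_reducer_spec : Claim_equal_wordcount_reducer := by
  intro mapped_data _
  unfold Spec_wordcount_reducer wordcount_reducer
  cases mapped_data with
  | nil => simp [wordcount_reducer_alt]
  | cons kv rest =>
    obtain ⟨k, v⟩ := kv
    simp only [List.foldl_cons, List.getLast?_nil, List.nil_append]
    rw [show [(k, v)] = [] ++ [(k, v)] from rfl, wr_fold_inv]
    simp [wordcount_reducer_alt]
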